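-- pv_equiv track=rewrite | github.com/Pedram-Fdi/CRP-PLT-SDDP | Tool.py | Transform5d
-- ===== SOURCE A (Python) =====
-- def Transform5d(array, dimension1, dimension2, dimension3, dimension4, dimension5):
--     if len(array) != dimension1 * dimension2 * dimension3 * dimension4 * dimension5:
--         raise ValueError("Array size does not match the specified dimensions.")
--
--     result = [[[[[array[i * (dimension2 * dimension3 * dimension4 * dimension5) +
--                               j * (dimension3 * dimension4 * dimension5) +
--                               k * (dimension4 * dimension5) +
--                               l * dimension5 +
--                               m]
--                 for m in range(dimension5)]
--                 for l in range(dimension4)]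
--                 for k in range(dimension3)]
--                 for j in range(dimension2)]
--                 for i in range(dimension1)]
--     return result
-- ===== SOURCE B (Python) =====
-- def Transform5d(array, dimension1, dimension2, dimension3, dimension4, dimension5):
--     if len(array) != dimension1 * dimension2 * dimension3 * dimension4 * dimension5:
--         raise ValueError("Array size does not match the specified dimensions.")
--
--     def split(seg, n, size):
--         return [seg[i * size:(i + 1) * size] for i in range(n)]
--
--     rows = split(array, dimension1 * dimension2 * dimension3 * dimension4, dimension5)
--     planes = split(rows, dimension1 * dimension2 * dimension3, dimension4)
--     cubes = split(planes, dimension1 * dimension2, dimension3)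
--     return split(cubes, dimension1, dimension2)
-- ===== Notes on version B (the rewrite author's own statement) =====
-- stated objective: alternative
-- what changed: Replaces the five nested comprehensions computing a flat index per leaf element by a bottom-up chunking: the flat array is split once into rows of length d5, then the row list is repeatedly grouped by d4, d3, d2 via slicing, with no per-element index arithmetic.
import Mathlib
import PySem

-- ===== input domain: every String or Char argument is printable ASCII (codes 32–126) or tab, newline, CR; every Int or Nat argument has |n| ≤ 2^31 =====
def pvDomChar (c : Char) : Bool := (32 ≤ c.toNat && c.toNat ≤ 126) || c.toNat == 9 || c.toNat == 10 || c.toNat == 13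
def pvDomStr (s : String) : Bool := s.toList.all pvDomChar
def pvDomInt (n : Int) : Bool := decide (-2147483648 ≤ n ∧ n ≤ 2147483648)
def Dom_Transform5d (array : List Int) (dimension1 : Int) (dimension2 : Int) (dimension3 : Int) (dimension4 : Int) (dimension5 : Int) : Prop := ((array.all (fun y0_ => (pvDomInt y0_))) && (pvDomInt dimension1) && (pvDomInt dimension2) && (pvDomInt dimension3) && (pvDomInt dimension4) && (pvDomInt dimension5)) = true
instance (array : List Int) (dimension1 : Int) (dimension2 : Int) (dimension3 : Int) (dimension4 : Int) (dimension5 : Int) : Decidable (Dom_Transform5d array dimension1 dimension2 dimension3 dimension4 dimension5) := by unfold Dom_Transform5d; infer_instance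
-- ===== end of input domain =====

-- B reshapes by bottom-up chunking (split into rows, then group level by level via slices)
-- instead of A's per-leaf flat-index arithmetic; same cost, different decomposition.

-- ===== PORT A =====
-- the 'raise ValueError' branch is exactly the inputs excluded by Pre_Transform5d;
-- inside Pre_ every reached index is in range, so pyGetD with default 0 is exact.
def Transform5d (array : List Int) (dimension1 : Int) (dimension2 : Int) (dimension3 : Int) (dimension4 : Int) (dimension5 : Int) : List (List (List (List (List Int)))) :=
  (PySem.List.pyRange 0 dimension1 1).map (fun i =>
  (PySem.List.pyRange 0 dimension2 1).map (fun j =>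
  (PySem.List.pyRange 0 dimension3 1).map (fun k =>
  (PySem.List.pyRange 0 dimension4 1).map (fun l =>
  (PySem.List.pyRange 0 dimension5 1).map (fun m =>
    PySem.List.pyGetD array
      (i * (dimension2 * dimension3 * dimension4 * dimension5) +
       j * (dimension3 * dimension4 * dimension5) +
       k * (dimension4 * dimension5) +
       l * dimension5 + m) 0)))))

-- ===== PORT B =====
-- split(seg, n, size) = [seg[i*size:(i+1)*size] for i in range(n)]
def pySplit {α : Type} (seg : List α) (n size : Int) : List (List α) :=
  (PySem.List.pyRange 0 n 1).map
    (fun i => PySem.List.slice seg (some (i * size)) (some ((i + 1) * size)))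

-- rows, then planes, then cubes, then the final grouping (Source B's four split calls, inlined)
def Transform5d_alt (array : List Int) (dimension1 : Int) (dimension2 : Int) (dimension3 : Int) (dimension4 : Int) (dimension5 : Int) : List (List (List (List (List Int)))) :=
  pySplit
    (pySplit
      (pySplit
        (pySplit array (dimension1 * dimension2 * dimension3 * dimension4) dimension5)
        (dimension1 * dimension2 * dimension3) dimension4)
      (dimension1 * dimension2) dimension3)
    dimension1 dimension2

-- ===== PRECONDITION & SPEC =====
-- Pre_ excludes exactly the inputs on which A raises ValueError (the size-mismatch guard).
def Pre_Transform5d (array : List Int) (dimension1 : Int) (dimension2 : Int) (dimension3 : Int) (dimension4 : Int) (dimension5 : Int) : Prop :=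
  (array.length : Int) = dimension1 * dimension2 * dimension3 * dimension4 * dimension5

instance (array : List Int) (dimension1 : Int) (dimension2 : Int) (dimension3 : Int) (dimension4 : Int) (dimension5 : Int) : Decidable (Pre_Transform5d array dimension1 dimension2 dimension3 dimension4 dimension5) := by unfold Pre_Transform5d; infer_instance

def pvWitness_Transform5d : List Int × Int × Int × Int × Int × Int := ([0,1,2,3,4,5,6,7], 2, 1, 2, 2, 1)

def Spec_Transform5d (array : List Int) (dimension1 : Int) (dimension2 : Int) (dimension3 : Int) (dimension4 : Int) (dimension5 : Int) (out : List (List (List (List (List Int))))) : Prop := out = Transform5d_alt array dimension1 dimension2 dimension3 dimension4 dimension5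
instance (array : List Int) (dimension1 : Int) (dimension2 : Int) (dimension3 : Int) (dimension4 : Int) (dimension5 : Int) (out : List (List (List (List (List Int))))) : Decidable (Spec_Transform5d array dimension1 dimension2 dimension3 dimension4 dimension5 out) := by unfold Spec_Transform5d; infer_instance

-- ===== CLAIM (what is proved, stated in full; the proofs are below) =====
def Claim_equal_Transform5d : Prop := ∀ (array : List Int) (dimension1 : Int) (dimension2 : Int) (dimension3 : Int) (dimension4 : Int) (dimension5 : Int), Dom_Transform5d array dimension1 dimension2 dimension3 dimension4 dimension5 → Pre_Transform5d array dimension1 dimension2 dimension3 dimension4 dimension5 → Spec_Transform5d array dimension1 dimension2 dimension3 dimension4 dimension5 (Transform5d array dimension1 dimension2 dimension3 dimension4 dimension5)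

-- ===== LEMMAS AND PROOFS =====

lemma pyRange0 (n : Nat) : PySem.List.pyRange 0 (n : Int) 1 = (List.range n).map Int.ofNat := by
  rw [PySem.List.pyRange_one]
  have h0 : ((n : Int) - 0).toNat = n := by omega
  rw [h0]
  exact List.map_congr_left (fun k _ => by simp [Int.ofNat_eq_natCast])

lemma pyRange_nonpos (d : Int) (h : d ≤ 0) : PySem.List.pyRange 0 d 1 = [] := by
  rw [PySem.List.pyRange_one]
  have h0 : (d - 0).toNat = 0 := by omega
  rw [h0]; rfl

lemma slice_nil {α : Type} (a b : Int) : PySem.List.slice ([] : List α) (some a) (some b) = [] := by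
  have h := PySem.List.length_slice ([] : List α) a b
  have ha : PySem.List.clampIdx 0 a = 0 := by simp only [PySem.List.clampIdx]; split_ifs <;> omega
  have hb : PySem.List.clampIdx 0 b = 0 := by simp only [PySem.List.clampIdx]; split_ifs <;> omega
  simp only [List.length_nil, ha, hb] at h
  exact List.eq_nil_of_length_eq_zero (by omega)

lemma map_const_replicate {α β : Type} (l : List α) (c : β) :
    l.map (fun _ => c) = List.replicate l.length c := by
  induction l with
  | nil => rfl
  | cons x xs ih => simp [List.replicate, ih]

lemma pySplit_count_nonpos {α : Type} (seg : List α) (n size : Int) (h : n ≤ 0) :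
    pySplit seg n size = [] := by
  unfold pySplit
  rw [pyRange_nonpos n h]
  rfl

lemma pySplit_nil {α : Type} (n size : Int) :
    pySplit ([] : List α) n size = List.replicate n.toNat [] := by
  unfold pySplit
  have hpt : ∀ i ∈ PySem.List.pyRange 0 n 1,
      PySem.List.slice ([] : List α) (some (i * size)) (some ((i + 1) * size)) = ([] : List α) :=
    fun i _ => slice_nil _ _
  rw [List.map_congr_left hpt, map_const_replicate, PySem.List.length_pyRange_one]
  norm_num

lemma pySplit_replicate {α : Type} (n s : Nat) (x : α) :
    pySplit (List.replicate (n * s) x) (n : Int) (s : Int) =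
      List.replicate n (List.replicate s x) := by
  unfold pySplit
  rw [pyRange0, List.map_map]
  have hpt : ∀ k ∈ List.range n,
      ((fun i => PySem.List.slice (List.replicate (n * s) x) (some (i * (s : Int))) (some ((i + 1) * (s : Int)))) ∘ Int.ofNat) k
        = List.replicate s x := by
    intro k hk
    rw [List.mem_range] at hk
    have h1 : (Int.ofNat k) * (s : Int) = ((k * s : Nat) : Int) := by
      simp only [Int.ofNat_eq_natCast]; push_cast; ring
    have h2 : (Int.ofNat k + 1) * (s : Int) = ((k * s : Nat) : Int) + (s : Int) := by
      simp only [Int.ofNat_eq_natCast]; push_cast; ring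
    simp only [Function.comp, h1, h2, PySem.List.slice_natCast_add]
    rw [List.drop_replicate, List.take_replicate]
    congr 1
    have hs : (k + 1) * s ≤ n * s := Nat.mul_le_mul_right s hk
    have hs' : (k + 1) * s = k * s + s := by ring
    omega
  rw [List.map_congr_left hpt, map_const_replicate, List.length_range]

lemma drop_take_map_range {α : Type} (N a s : Nat) (f : Nat → α) (h : a + s ≤ N) :
    (((List.range N).map f).drop a).take s = (List.range s).map (fun t => f (a + t)) := by
  apply List.ext_getElem
  · simp; omega
  · intro i h1 h2
    simp only [List.getElem_take, List.getElem_drop, List.getElem_map, List.getElem_range]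

lemma pySplit_map_range {α : Type} (n s : Nat) (f : Nat → α) :
    pySplit ((List.range (n * s)).map f) (n : Int) (s : Int) =
      (List.range n).map (fun i => (List.range s).map (fun t => f (i * s + t))) := by
  unfold pySplit
  rw [pyRange0, List.map_map]
  apply List.map_congr_left
  intro k hk
  rw [List.mem_range] at hk
  have h1 : (Int.ofNat k) * (s : Int) = ((k * s : Nat) : Int) := by
    simp only [Int.ofNat_eq_natCast]; push_cast; ring
  have h2 : (Int.ofNat k + 1) * (s : Int) = ((k * s : Nat) : Int) + (s : Int) := by
    simp only [Int.ofNat_eq_natCast]; push_cast; ring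
  simp only [Function.comp, h1, h2, PySem.List.slice_natCast_add]
  apply drop_take_map_range
  have hs : (k + 1) * s ≤ n * s := Nat.mul_le_mul_right s hk
  have hs' : (k + 1) * s = k * s + s := by ring
  omega

lemma self_map_range (xs : List Int) :
    xs = (List.range xs.length).map (fun t => xs.getD t 0) := by
  apply List.ext_getElem
  · simp
  · intro i h1 h2
    simp [List.getD_eq_getElem?_getD, h1]

-- ===== VERDICT (by name: the statement is the Claim_ definition above) =====
theorem Transform5d_spec : Claim_equal_Transform5d := by
  intro array d1 d2 d3 d4 d5 _hdom hpre
  unfold Spec_Transform5d Transform5d Transform5d_alt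
  unfold Pre_Transform5d at hpre
  rcases le_or_gt d1 0 with h1 | h1
  · -- d1 ≤ 0 : both sides empty
    rw [pyRange_nonpos d1 h1, pySplit_count_nonpos _ d1 d2 h1]
    rfl
  obtain ⟨n1, rfl⟩ : ∃ n : Nat, d1 = (n : Int) := ⟨d1.toNat, by omega⟩
  rcases le_or_gt d2 0 with h2 | h2
  · -- d2 ≤ 0 : A = replicate n1 [], B's 'cubes' has nonpositive count
    simp only [pyRange_nonpos d2 h2, List.map_nil]
    rw [map_const_replicate, PySem.List.length_pyRange_one]
    rw [pySplit_count_nonpos _ ((n1 : Int) * d2) d3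
        (mul_nonpos_of_nonneg_of_nonpos (by positivity) h2)]
    rw [pySplit_nil]
    norm_num
  obtain ⟨n2, rfl⟩ : ∃ n : Nat, d2 = (n : Int) := ⟨d2.toNat, by omega⟩
  rcases le_or_gt d3 0 with h3 | h3
  · -- d3 ≤ 0 : B's 'planes' has nonpositive count
    simp only [pyRange_nonpos d3 h3, List.map_nil]
    simp only [map_const_replicate, PySem.List.length_pyRange_one]
    rw [pySplit_count_nonpos _ ((n1 : Int) * (n2 : Int) * d3) d4
        (mul_nonpos_of_nonneg_of_nonpos (by positivity) h3)]
    rw [pySplit_nil ((n1 : Int) * (n2 : Int)) d3]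
    have hc : ((n1 : Int) * (n2 : Int)).toNat = n1 * n2 := by
      have : ((n1 : Int) * (n2 : Int)) = ((n1 * n2 : Nat) : Int) := by push_cast; ring
      rw [this, Int.toNat_natCast]
    rw [hc, pySplit_replicate n1 n2]
    norm_num
  obtain ⟨n3, rfl⟩ : ∃ n : Nat, d3 = (n : Int) := ⟨d3.toNat, by omega⟩
  rcases le_or_gt d4 0 with h4 | h4
  · -- d4 ≤ 0 : B's 'rows' has nonpositive count
    simp only [pyRange_nonpos d4 h4, List.map_nil]
    simp only [map_const_replicate, PySem.List.length_pyRange_one]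
    rw [pySplit_count_nonpos _ ((n1 : Int) * (n2 : Int) * (n3 : Int) * d4) d5
        (mul_nonpos_of_nonneg_of_nonpos (by positivity) h4)]
    rw [pySplit_nil ((n1 : Int) * (n2 : Int) * (n3 : Int)) d4]
    have hc : ((n1 : Int) * (n2 : Int) * (n3 : Int)).toNat = n1 * n2 * n3 := by
      have : ((n1 : Int) * (n2 : Int) * (n3 : Int)) = ((n1 * n2 * n3 : Nat) : Int) := by push_cast; ring
      rw [this, Int.toNat_natCast]
    rw [hc]
    have hc2 : ((n1 : Int) * (n2 : Int)) = ((n1 * n2 : Nat) : Int) := by push_cast; ring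
    rw [hc2, pySplit_replicate (n1 * n2) n3, pySplit_replicate n1 n2]
    norm_num
  obtain ⟨n4, rfl⟩ : ∃ n : Nat, d4 = (n : Int) := ⟨d4.toNat, by omega⟩
  rcases le_or_gt d5 0 with h5 | h5
  · -- d5 ≤ 0 : the array must be empty
    have harr : array = [] := by
      apply List.eq_nil_of_length_eq_zero
      have hpos : (0 : Int) < (n1 : Int) * (n2 : Int) * (n3 : Int) * (n4 : Int) := by positivity
      nlinarith [hpre, Int.natCast_nonneg array.length]
    subst harr
    simp only [pyRange_nonpos d5 h5, List.map_nil]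
    simp only [map_const_replicate, PySem.List.length_pyRange_one]
    rw [pySplit_nil ((n1 : Int) * (n2 : Int) * (n3 : Int) * (n4 : Int)) d5]
    have hc : ((n1 : Int) * (n2 : Int) * (n3 : Int) * (n4 : Int)).toNat = n1 * n2 * n3 * n4 := by
      have : ((n1 : Int) * (n2 : Int) * (n3 : Int) * (n4 : Int)) = ((n1 * n2 * n3 * n4 : Nat) : Int) := by push_cast; ring
      rw [this, Int.toNat_natCast]
    rw [hc]
    have hc3 : ((n1 : Int) * (n2 : Int) * (n3 : Int)) = ((n1 * n2 * n3 : Nat) : Int) := by push_cast; ring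
    have hc2 : ((n1 : Int) * (n2 : Int)) = ((n1 * n2 : Nat) : Int) := by push_cast; ring
    rw [hc3, pySplit_replicate (n1 * n2 * n3) n4, hc2,
        pySplit_replicate (n1 * n2) n3, pySplit_replicate n1 n2]
    norm_num
  obtain ⟨n5, rfl⟩ : ∃ n : Nat, d5 = (n : Int) := ⟨d5.toNat, by omega⟩
  -- main case: all five dimensions are casts of naturals
  have hlen : array.length = n1 * n2 * n3 * n4 * n5 := by exact_mod_cast hpre
  have hself : array = (List.range (n1 * n2 * n3 * n4 * n5)).map (fun t => array.getD t 0) := by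
    rw [← hlen]; exact self_map_range array
  have hc4 : ((n1 : Int) * (n2 : Int) * (n3 : Int) * (n4 : Int)) = ((n1 * n2 * n3 * n4 : Nat) : Int) := by push_cast; ring
  have hc3 : ((n1 : Int) * (n2 : Int) * (n3 : Int)) = ((n1 * n2 * n3 : Nat) : Int) := by push_cast; ring
  have hc2 : ((n1 : Int) * (n2 : Int)) = ((n1 * n2 : Nat) : Int) := by push_cast; ring
  conv_rhs =>
    rw [hc4, hself, pySplit_map_range (n1 * n2 * n3 * n4) n5,
        hc3, pySplit_map_range (n1 * n2 * n3) n4,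
        hc2, pySplit_map_range (n1 * n2) n3,
        pySplit_map_range n1 n2]
  simp only [pyRange0, List.map_map]
  apply List.map_congr_left
  intro i _
  simp only [Function.comp]
  apply List.map_congr_left
  intro j _
  apply List.map_congr_left
  intro k _
  apply List.map_congr_left
  intro l _
  apply List.map_congr_left
  intro m _
  simp only [Function.comp_apply]
  have hidx : Int.ofNat i * ((n2 : Int) * (n3 : Int) * (n4 : Int) * (n5 : Int)) +
      Int.ofNat j * ((n3 : Int) * (n4 : Int) * (n5 : Int)) +
      Int.ofNat k * ((n4 : Int) * (n5 : Int)) + Int.ofNat l * (n5 : Int) + Int.ofNat m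
      = (((((((i * n2 + j) * n3 + k) * n4 + l) * n5 + m : Nat)) : Int)) := by
    simp only [Int.ofNat_eq_natCast]; push_cast; ring
  rw [hidx, PySem.List.pyGetD_natCast]
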